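-- pv_equiv track=rewrite | github.com/m-r-sar/Bioinformatics | Rosalind-Problems/Error-Correction-in-Reads.py | function
-- ===== SOURCE A (Python) =====
-- def Complementing_a_Strand_of_DNA(genome):
--     new_genome = []
--     for letter in genome:
--         if letter == "A":
--             new_genome.append("T")
--         elif letter == "T":
--             new_genome.append("A")
--         elif letter == "C":
--             new_genome.append("G")
--         elif letter == "G":
--             new_genome.append("C")
--     new_genome.reverse()
--     new_genome = ''.join(new_genome)
--     return new_genome
--
-- def function(dataset):
--     dataset = list(dataset.values())
--     reverse_complements = [Complementing_a_Strand_of_DNA(s) for s in dataset]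
--     uniques = []
--     repeats = []
--     not_in_uniques = []
--     corrections = {}
--     for reed in dataset:
--         if reed not in uniques:
--             uniques.append(reed)
--         else:
--             repeats.append(reed)
--             not_in_uniques.append(reed)
--
--     for i in range(len(repeats)):
--         if repeats[i] in uniques:
--             uniques.remove(repeats[i])
--     for i in range(len(dataset)):
--         if reverse_complements[i] in uniques:
--             uniques.remove(reverse_complements[i])
--             not_in_uniques.append(reverse_complements[i])
--
--     def get_hamming_distance(a, b):
--         if sum(1 for char_a, char_b in zip(a, b) if char_a != char_b) == 1:
--             return True
--         else:
--             return False
--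
--     reversed_not_in_uniques = [Complementing_a_Strand_of_DNA(s) for s in not_in_uniques]
--     for uni in uniques:
--         flag = False
--         for s in not_in_uniques:
--             if get_hamming_distance(uni, s):
--                 corrections[uni] = s
--                 flag = True
--                 break
--         if not flag:
--             for s in reversed_not_in_uniques:
--                 if get_hamming_distance(uni, s):
--                     corrections[uni] = s
--                     break
--
--     return corrections
-- ===== SOURCE B (Python) =====
-- def function(dataset):
--     # Python B: one-pass hash-based re-implementation (Counter + sets) replacing A's
--     # quadratic list membership/remove passes; same return value.
--     reads = list(dataset.values())
--
--     comp = {"A": "T", "T": "A", "C": "G", "G": "C"}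
--
--     def rc(s):
--         return ''.join(comp[ch] for ch in reversed(s) if ch in comp)
--
--     cnt = {}
--     for r in reads:
--         cnt[r] = cnt.get(r, 0) + 1
--
--     rcs = [rc(s) for s in reads]
--     rc_set = set(rcs)
--
--     # non-first occurrences, in dataset order (A's `repeats`/initial `not_in_uniques`)
--     seen = set()
--     repeats = []
--     for r in reads:
--         if r in seen:
--             repeats.append(r)
--         else:
--             seen.add(r)
--
--     # reverse complements that hit a count-1 read, first hit only, in dataset order
--     rc_seen = set()
--     rc_appends = []
--     for v in rcs:
--         if cnt.get(v, 0) == 1 and v not in rc_seen: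
--             rc_seen.add(v)
--             rc_appends.append(v)
--
--     uniques = [r for r in reads if cnt.get(r, 0) == 1 and r not in rc_set]
--     candidates = repeats + rc_appends
--     rc_candidates = [rc(s) for s in candidates]
--
--     def ham1(a, b):
--         return sum(ca != cb for ca, cb in zip(a, b)) == 1
--
--     corrections = {}
--     for u in uniques:
--         m = next((s for s in candidates if ham1(u, s)), None)
--         if m is None:
--             m = next((s for s in rc_candidates if ham1(u, s)), None)
--         if m is not None:
--             corrections[u] = m
--     return corrections
-- ===== Notes on version B (the rewrite author's own statement) =====
-- stated objective: faster
-- what changed: B replaces A's quadratic list-membership tests and list.remove passes (uniques/repeats bookkeeping and the re-scan removal loops) with a single count dict plus hash sets built in one pass each, computing the surviving unique reads and the correction-candidate list directly; the hamming-1 matching then runs on the same candidate lists.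
import Mathlib
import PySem

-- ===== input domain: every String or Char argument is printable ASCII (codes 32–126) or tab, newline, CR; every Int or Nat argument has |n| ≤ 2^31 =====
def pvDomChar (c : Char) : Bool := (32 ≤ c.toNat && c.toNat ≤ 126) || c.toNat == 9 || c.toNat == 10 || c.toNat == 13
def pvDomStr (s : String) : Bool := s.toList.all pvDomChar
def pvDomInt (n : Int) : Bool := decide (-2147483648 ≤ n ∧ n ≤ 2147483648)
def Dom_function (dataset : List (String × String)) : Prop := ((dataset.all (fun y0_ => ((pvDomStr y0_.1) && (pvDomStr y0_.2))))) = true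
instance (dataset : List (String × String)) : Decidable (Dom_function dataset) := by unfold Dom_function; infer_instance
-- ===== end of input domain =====

-- B replaces A's repeated list-membership/remove passes by a count dict and hash sets built in
-- single passes; the returned dict is identical.

-- ===== PORT A =====
-- Complementing_a_Strand_of_DNA: append the complement letter per char, reverse, join.
def pvCompStep (acc : List Char) (letter : Char) : List Char :=
  if letter = 'A' then acc ++ ['T']
  else if letter = 'T' then acc ++ ['A']
  else if letter = 'C' then acc ++ ['G']
  else if letter = 'G' then acc ++ ['C']
  else acc

def Complementing_a_Strand_of_DNA (genome : String) : String :=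
  String.ofList ((genome.toList.foldl pvCompStep []).reverse)

-- get_hamming_distance: sum(1 for a,b in zip if a != b) == 1, returned through if/else
def pvHamA (a b : String) : Bool :=
  if ((a.toList.zip b.toList).foldl (fun acc p => if p.1 ≠ p.2 then acc + 1 else acc) (0 : Int)) = 1
  then true else false

-- first loop: build uniques / repeats / not_in_uniques
def pvAStep1 (st : List String × List String × List String) (reed : String) :
    List String × List String × List String :=
  if reed ∉ st.1 then (st.1 ++ [reed], st.2.1, st.2.2)
  else (st.1, st.2.1 ++ [reed], st.2.2 ++ [reed])

-- second loop body: guarded uniques.remove(repeats[i])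
def pvAStep2 (u : List String) (x : String) : List String :=
  if x ∈ u then (PySem.List.remove? u x).getD u else u

-- third loop body: guarded uniques.remove + not_in_uniques.append of reverse_complements[i]
def pvAStep3 (st : List String × List String) (x : String) : List String × List String :=
  if x ∈ st.1 then ((PySem.List.remove? st.1 x).getD st.1, st.2 ++ [x]) else st

def function (dataset : List (String × String)) : List (String × String) :=
  let ds := (PySem.Dict.ofList dataset).values
  let reverse_complements := ds.map Complementing_a_Strand_of_DNA
  let st1 := ds.foldl pvAStep1 ([], [], [])
  let uniques := st1.1
  let repeats := st1.2.1
  let not_in_uniques := st1.2.2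
  let uniques2 := (PySem.List.pyRange 0 (repeats.length : Int) 1).foldl
      (fun u i => pvAStep2 u (PySem.List.pyGetD repeats i "")) uniques
  let st3 := (PySem.List.pyRange 0 (ds.length : Int) 1).foldl
      (fun st i => pvAStep3 st (PySem.List.pyGetD reverse_complements i ""))
      (uniques2, not_in_uniques)
  let uniques3 := st3.1
  let nin3 := st3.2
  let reversed_not_in_uniques := nin3.map Complementing_a_Strand_of_DNA
  let corrections := uniques3.foldl (fun (d : PySem.Dict String String) uni =>
      match nin3.find? (fun s => pvHamA uni s) with
      | some s => d.insert uni s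
      | none =>
        match reversed_not_in_uniques.find? (fun s => pvHamA uni s) with
        | some s => d.insert uni s
        | none => d) PySem.Dict.empty
  corrections.items

-- ===== PORT B =====
def pvCompDict : PySem.Dict Char Char :=
  PySem.Dict.ofList [('A', 'T'), ('T', 'A'), ('C', 'G'), ('G', 'C')]

-- rc: join comp[ch] over reversed(s) keeping only ch in comp; the filter+lookup is get?/filterMap
def pvRc (s : String) : String :=
  String.ofList (s.toList.reverse.filterMap (fun ch => pvCompDict.get? ch))

-- ham1: sum(ca != cb for ...) == 1
def pvHamB (a b : String) : Bool :=
  ((a.toList.zip b.toList).foldl (fun acc p => acc + (if p.1 ≠ p.2 then (1 : Int) else 0)) 0) == 1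

-- seen-set pass collecting the non-first occurrences
def pvBStep1 (st : PySem.Set String × List String) (r : String) :
    PySem.Set String × List String :=
  if PySem.Set.contains st.1 r then (st.1, st.2 ++ [r]) else (PySem.Set.add st.1 r, st.2)

-- pass over the reverse complements collecting first hits on count-1 reads
def pvBStep2 (cnt : PySem.Dict String Int) (st : PySem.Set String × List String) (v : String) :
    PySem.Set String × List String :=
  if cnt.getD v 0 == 1 && !(PySem.Set.contains st.1 v) then (PySem.Set.add st.1 v, st.2 ++ [v])
  else st

def function_alt (dataset : List (String × String)) : List (String × String) :=
  let reads := (PySem.Dict.ofList dataset).values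
  let cnt := reads.foldl (fun (d : PySem.Dict String Int) r => d.insert r (d.getD r 0 + 1))
      PySem.Dict.empty
  let rcs := reads.map pvRc
  let rcSet := PySem.Set.ofList rcs
  let repeats := (reads.foldl pvBStep1 (PySem.Set.empty, [])).2
  let rcAppends := (rcs.foldl (pvBStep2 cnt) (PySem.Set.empty, [])).2
  let uniques := reads.filter (fun r => cnt.getD r 0 == 1 && !(PySem.Set.contains rcSet r))
  let candidates := repeats ++ rcAppends
  let rcCandidates := candidates.map pvRc
  let corrections := uniques.foldl (fun (d : PySem.Dict String String) u =>
      match candidates.find? (fun s => pvHamB u s) with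
      | some s => d.insert u s
      | none =>
        match rcCandidates.find? (fun s => pvHamB u s) with
        | some s => d.insert u s
        | none => d) PySem.Dict.empty
  corrections.items

-- ===== PRECONDITION & SPEC =====
def Spec_function (dataset : List (String × String)) (out : List (String × String)) : Prop := out = function_alt dataset
instance (dataset : List (String × String)) (out : List (String × String)) : Decidable (Spec_function dataset out) := by unfold Spec_function; infer_instance

-- ===== CLAIM (what is proved, stated in full; the proofs are below) =====
def Claim_equal_function : Prop := ∀ (dataset : List (String × String)), Dom_function dataset → Spec_function dataset (function dataset)

-- ===== LEMMAS AND PROOFS =====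

theorem get?_comp_none (c : Char) (h1 : ¬ c = 'A') (h2 : ¬ c = 'T') (h3 : ¬ c = 'C')
    (h4 : ¬ c = 'G') : pvCompDict.get? c = none := by
  have h : pvCompDict = PySem.Dict.mk [('A', 'T'), ('T', 'A'), ('C', 'G'), ('G', 'C')] := by decide
  rw [h]
  simp [beq_iff_eq, Ne.symm h1, Ne.symm h2, Ne.symm h3, Ne.symm h4, PySem.Dict.get?]

theorem compStep_eq (acc : List Char) (c : Char) :
    pvCompStep acc c = acc ++ (pvCompDict.get? c).toList := by
  unfold pvCompStep
  split_ifs with h1 h2 h3 h4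
  · subst h1; rw [show pvCompDict.get? 'A' = some 'T' from by decide]; rfl
  · subst h2; rw [show pvCompDict.get? 'T' = some 'A' from by decide]; rfl
  · subst h3; rw [show pvCompDict.get? 'C' = some 'G' from by decide]; rfl
  · subst h4; rw [show pvCompDict.get? 'G' = some 'C' from by decide]; rfl
  · rw [get?_comp_none c h1 h2 h3 h4]; simp

theorem foldl_compStep (cs : List Char) (acc : List Char) :
    cs.foldl pvCompStep acc = acc ++ cs.filterMap (fun ch => pvCompDict.get? ch) := by
  induction cs generalizing acc with
  | nil => simp
  | cons c cs ih =>
    simp only [List.foldl_cons, ih, compStep_eq, List.filterMap_cons]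
    cases h : pvCompDict.get? c <;> simp

theorem comp_eq_rc (s : String) : Complementing_a_Strand_of_DNA s = pvRc s := by
  unfold Complementing_a_Strand_of_DNA pvRc
  rw [foldl_compStep, List.nil_append, ← List.filterMap_reverse]

theorem ham_eq (a b : String) : pvHamA a b = pvHamB a b := by
  unfold pvHamA pvHamB
  have h : ∀ (l : List (Char × Char)) (acc : Int),
      l.foldl (fun acc p => if p.1 ≠ p.2 then acc + 1 else acc) acc =
        l.foldl (fun acc p => acc + (if p.1 ≠ p.2 then (1 : Int) else 0)) acc := by
    intro l
    induction l with
    | nil => intro acc; rfl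
    | cons p l ih => intro acc; simp only [List.foldl_cons, ih]; congr 1; split <;> simp
  rw [h]
  split <;> simp_all

-- loop 1 of A equals B's seen/repeats fold (the third component tracks the second)
theorem loop1_eq (L : List String) (u r : List String) :
    L.foldl pvAStep1 (u, r, r) =
      ((L.foldl pvBStep1 (u, r)).1, (L.foldl pvBStep1 (u, r)).2, (L.foldl pvBStep1 (u, r)).2) := by
  induction L generalizing u r with
  | nil => rfl
  | cons x L ih =>
    simp only [List.foldl_cons, pvAStep1, pvBStep1]
    by_cases hx : x ∈ u
    · simp only [hx, not_true_eq_false, if_false, (PySem.Set.contains_iff u x).2 hx, if_true]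
      exact ih u (r ++ [x])
    · have hc : PySem.Set.contains u x = false := by
        by_contra h
        exact hx ((PySem.Set.contains_iff u x).1 (by simpa using h))
      simp only [hx, not_false_eq_true, if_true, hc, if_false, Bool.false_eq_true,
        PySem.Set.add_of_not_mem hx]
      exact ih (u ++ [x]) r

theorem bstep1_fst (L : List String) (u : PySem.Set String) (r : List String) :
    (L.foldl pvBStep1 (u, r)).1 = PySem.Set.update u L := by
  induction L generalizing u r with
  | nil => rfl
  | cons x L ih =>
    simp only [List.foldl_cons, pvBStep1, PySem.Set.update_cons]
    by_cases hx : x ∈ u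
    · rw [if_pos ((PySem.Set.contains_iff u x).2 hx), PySem.Set.add_of_mem hx]
      exact ih u (r ++ [x])
    · rw [if_neg (by simp [hx])]
      exact ih _ r

theorem bstep1_snd_mem (L : List String) (u : PySem.Set String) (r : List String) (x : String) :
    x ∈ (L.foldl pvBStep1 (u, r)).2 ↔
      x ∈ r ∨ (if x ∈ u then 1 ≤ L.count x else 2 ≤ L.count x) := by
  induction L generalizing u r with
  | nil => simp
  | cons y L ih =>
    simp only [List.foldl_cons, pvBStep1]
    by_cases hy : y ∈ u
    · rw [if_pos ((PySem.Set.contains_iff u y).2 hy), ih]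
      by_cases hxy : x = y
      · subst hxy; simp [hy]
      · have hcnt : (y :: L).count x = L.count x := by
          simp [Ne.symm hxy]
        rw [hcnt]
        simp [hxy]
    · rw [if_neg (by simp [hy]), ih]
      by_cases hxy : x = y
      · subst hxy
        rw [if_pos ((PySem.Set.mem_add u x x).2 (Or.inr rfl)), if_neg hy,
          List.count_cons_self]
        constructor
        · rintro (h | h) <;> [exact Or.inl h; exact Or.inr (by omega)]
        · rintro (h | h) <;> [exact Or.inl h; exact Or.inr (by omega)]
      · have hcnt : (y :: L).count x = L.count x := by
          simp [Ne.symm hxy]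
        by_cases hx : x ∈ u
        · rw [hcnt, if_pos ((PySem.Set.mem_add u y x).2 (Or.inl hx)), if_pos hx]
        · rw [hcnt, if_neg (by rw [PySem.Set.mem_add]; rintro (h | h) <;> [exact hx h; exact hxy h]),
            if_neg hx]

theorem remove_mem_nodup (u : List String) (x : String) (hx : x ∈ u) (hu : u.Nodup) :
    (PySem.List.remove? u x).getD u = u.filter (fun y => y != x) := by
  rw [PySem.List.remove?_eq_some_erase u x hx, Option.getD_some, List.Nodup.erase_eq_filter hu]

theorem removefold_eq_filter (D : List String) (u : List String) (hu : u.Nodup) :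
    D.foldl pvAStep2 u = u.filter (fun x => decide (x ∉ D)) := by
  induction D generalizing u with
  | nil => simp
  | cons y D ih =>
    simp only [List.foldl_cons, pvAStep2]
    by_cases hy : y ∈ u
    · rw [if_pos hy, remove_mem_nodup u y hy hu, ih _ (List.Nodup.filter _ hu),
        List.filter_filter]
      apply List.filter_congr
      intro x hx
      by_cases h1 : x = y
      · subst h1; simp
      · by_cases h2 : x ∈ D <;> simp [h2, h1]
    · rw [if_neg hy, ih u hu]
      apply List.filter_congr
      intro x hx
      have : x ≠ y := fun h => hy (h ▸ hx)
      simp [this]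

-- filtering by a predicate that forces count ≤ 1 passes set-dedup unchanged
theorem dedup_filter_aux (L : List String) (p : String → Bool)
    (hp : ∀ x, p x = true → L.count x ≤ 1) :
    (PySem.Set.ofList L).filter p = L.filter p := by
  induction L with
  | nil => rfl
  | cons y T ih =>
    rw [PySem.Set.ofList_cons, List.filter_cons, List.filter_cons]
    have hT : ∀ x, p x = true → T.count x ≤ 1 := by
      intro x hx
      have := hp x hx
      have hc : T.count x ≤ (y :: T).count x := by
        rw [List.count_cons]; omega
      omega
    by_cases hpy : p y = true
    · have hyT : y ∉ T := by
        have := hp y hpy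
        rw [List.count_cons_self] at this
        exact List.count_eq_zero.1 (by omega)
      have hdis : (PySem.Set.ofList T).discard y = PySem.Set.ofList T := by
        unfold PySem.Set.discard
        apply List.filter_eq_self.2
        intro a ha
        have haT : a ∈ T := (PySem.Set.mem_ofList T a).1 ha
        have hne : a ≠ y := fun h => hyT (h ▸ haT)
        simp [hne]
      rw [hpy, hdis, ih hT]
    · have hpy' : p y = false := by revert hpy; cases p y <;> simp
      rw [hpy']
      have hfe : ((PySem.Set.ofList T).discard y).filter p = (PySem.Set.ofList T).filter p := by
        unfold PySem.Set.discard
        rw [List.filter_filter]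
        apply List.filter_congr
        intro a ha
        by_cases hay : a = y
        · subst hay; simp [hpy']
        · simp [hay]
      rw [hfe, ih hT]

theorem bstep2_split (cnt : PySem.Dict String Int) (M : List String)
    (seen : PySem.Set String) (app : List String) :
    (M.foldl (pvBStep2 cnt) (seen, app)).1 = (M.foldl (pvBStep2 cnt) (seen, [])).1 ∧
      (M.foldl (pvBStep2 cnt) (seen, app)).2 = app ++ (M.foldl (pvBStep2 cnt) (seen, [])).2 := by
  induction M generalizing seen app with
  | nil => simp
  | cons v M ih =>
    simp only [List.foldl_cons, pvBStep2]
    by_cases h : (cnt.getD v 0 == 1 && !(PySem.Set.contains seen v)) = true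
    · rw [if_pos h, if_pos h]
      refine ⟨(ih _ _).1.trans (ih _ _).1.symm, ?_⟩
      rw [(ih _ (app ++ [v])).2, (ih _ ([] ++ [v])).2]
      simp
    · rw [if_neg h, if_neg h]
      exact ih _ _

theorem bstep2_fst_mem (cnt : PySem.Dict String Int) (M : List String)
    (seen : PySem.Set String) (app : List String) (x : String) :
    x ∈ (M.foldl (pvBStep2 cnt) (seen, app)).1 ↔
      x ∈ seen ∨ (x ∈ M ∧ cnt.getD x 0 = 1) := by
  induction M generalizing seen app with
  | nil => simp
  | cons v M ih =>
    simp only [List.foldl_cons, pvBStep2]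
    by_cases h : (cnt.getD v 0 == 1 && !(PySem.Set.contains seen v)) = true
    · rw [if_pos h, ih]
      have hv : cnt.getD v 0 = 1 := by
        have h' := h
        rw [Bool.and_eq_true, beq_iff_eq] at h'
        exact h'.1
      constructor
      · rintro (hs | ⟨hM, hc⟩)
        · rcases (PySem.Set.mem_add seen v x).1 hs with h' | h'
          · exact Or.inl h'
          · exact Or.inr ⟨by simp [h'], by rw [h']; exact hv⟩
        · exact Or.inr ⟨List.mem_cons_of_mem _ hM, hc⟩
      · rintro (hs | ⟨hM, hc⟩)
        · exact Or.inl ((PySem.Set.mem_add seen v x).2 (Or.inl hs))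
        · rcases List.mem_cons.1 hM with h' | h'
          · exact Or.inl ((PySem.Set.mem_add seen v x).2 (Or.inr h'))
          · exact Or.inr ⟨h', hc⟩
    · rw [if_neg h, ih]
      constructor
      · rintro (hs | ⟨hM, hc⟩)
        · exact Or.inl hs
        · exact Or.inr ⟨List.mem_cons_of_mem _ hM, hc⟩
      · rintro (hs | ⟨hM, hc⟩)
        · exact Or.inl hs
        · rcases List.mem_cons.1 hM with h' | h'
          · subst h'
            by_cases hcv : x ∈ seen
            · exact Or.inl hcv
            · exfalso
              apply h
              rw [Bool.and_eq_true, beq_iff_eq, hc]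
              exact ⟨rfl, by simp [hcv]⟩
          · exact Or.inr ⟨h', hc⟩

theorem u2_nodup (L : List String) : (L.filter (fun x => decide (L.count x = 1))).Nodup := by
  apply List.nodup_iff_count.mpr
  intro a
  by_cases hc : L.count a = 1
  · calc (L.filter (fun x => decide (L.count x = 1))).count a ≤ L.count a :=
        List.Sublist.count_le a List.filter_sublist
      _ = 1 := hc
  · have : a ∉ L.filter (fun x => decide (L.count x = 1)) := by
      rw [List.mem_filter]
      rintro ⟨-, h⟩
      exact hc (by simpa using h)
    rw [List.count_eq_zero.2 this]
    omega

theorem mem_u2 (L : List String) (x : String) :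
    x ∈ L.filter (fun x => decide (L.count x = 1)) ↔ L.count x = 1 := by
  rw [List.mem_filter]
  constructor
  · rintro ⟨-, h⟩; simpa using h
  · intro h
    exact ⟨List.count_pos_iff.1 (by omega), by simpa using h⟩

-- joint loop-3 lemma: A's remove/append pass mirrors B's seen-set pass
theorem loop3_eq (L : List String) (cnt : PySem.Dict String Int)
    (hcnt : ∀ x, cnt.getD x 0 = (L.count x : Int))
    (M : List String) (seen : PySem.Set String) (n : List String) :
    M.foldl pvAStep3
        ((L.filter (fun x => decide (L.count x = 1))).filter
          (fun x => !(PySem.Set.contains seen x)), n) =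
      ((L.filter (fun x => decide (L.count x = 1))).filter
          (fun x => !(PySem.Set.contains (M.foldl (pvBStep2 cnt) (seen, [])).1 x)),
        n ++ (M.foldl (pvBStep2 cnt) (seen, [])).2) := by
  set U2 := L.filter (fun x => decide (L.count x = 1)) with hU2
  induction M generalizing seen n with
  | nil => simp
  | cons v M ih =>
    simp only [List.foldl_cons, pvAStep3, pvBStep2]
    by_cases hg : L.count v = 1 ∧ v ∉ seen
    · have hvU : v ∈ U2.filter (fun x => !(PySem.Set.contains seen x)) := by
        rw [List.mem_filter]
        refine ⟨(mem_u2 L v).2 hg.1, by simp [hg.2]⟩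
      have hBg : (cnt.getD v 0 == 1 && !(PySem.Set.contains seen v)) = true := by
        rw [Bool.and_eq_true, beq_iff_eq, hcnt v, hg.1]
        exact ⟨by norm_num, by simp [hg.2]⟩
      rw [if_pos hvU, if_pos hBg,
        remove_mem_nodup _ v hvU (List.Nodup.filter _ (u2_nodup L)), List.filter_filter]
      have hfe : (U2.filter fun x => x != v && !PySem.Set.contains seen x) =
          U2.filter (fun x => !(PySem.Set.contains (PySem.Set.add seen v) x)) := by
        apply List.filter_congr
        intro a ha
        by_cases hav : a = v
        · subst hav; simp [PySem.Set.mem_add]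
        · by_cases has : a ∈ seen <;>
            simp [PySem.Set.mem_add, has, hav]
      simp only [List.nil_append]
      rw [hfe, ih _ (n ++ [v]), (bstep2_split cnt M (PySem.Set.add seen v) [v]).1,
        (bstep2_split cnt M (PySem.Set.add seen v) [v]).2]
      simp
    · have hvU : v ∉ U2.filter (fun x => !(PySem.Set.contains seen x)) := by
        rw [List.mem_filter]
        rintro ⟨h1, h2⟩
        apply hg
        refine ⟨(mem_u2 L v).1 h1, ?_⟩
        intro hs
        rw [(PySem.Set.contains_iff seen v).2 hs] at h2
        simp at h2
      have hBg : ¬ (cnt.getD v 0 == 1 && !(PySem.Set.contains seen v)) = true := by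
        rw [Bool.and_eq_true, beq_iff_eq, hcnt v]
        rintro ⟨h1, h2⟩
        apply hg
        constructor
        · exact_mod_cast h1
        · intro hs
          rw [(PySem.Set.contains_iff seen v).2 hs] at h2
          simp at h2
      rw [if_neg hvU, if_neg hBg]
      exact ih seen n

-- ===== VERDICT (by name: the statement is the Claim_ definition above) =====
theorem function_spec : Claim_equal_function := by
  unfold Claim_equal_function
  intro dataset _
  unfold Spec_function function function_alt
  generalize (PySem.Dict.ofList dataset).values = L
  have hfun : Complementing_a_Strand_of_DNA = pvRc := funext comp_eq_rc
  have hham : pvHamA = pvHamB := funext fun a => funext (ham_eq a)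
  simp only [hfun, hham]
  rw [PySem.Dict.foldl_insert_getD_add_one_eq_counter]
  rw [loop1_eq L [] []]
  rw [show (PySem.Set.empty : PySem.Set String) = ([] : List String) from rfl]
  dsimp only
  rw [PySem.List.foldl_pyRange_zero_pyGetD' ((List.foldl pvBStep1 ([], []) L).2) "" pvAStep2,
    bstep1_fst L [] [],
    show PySem.Set.update ([] : List String) L = PySem.Set.ofList L from PySem.Set.update_empty L,
    removefold_eq_filter _ _ (PySem.Set.nodup_ofList L)]
  have hcnt : ∀ x, (PySem.Dict.counter L).getD x 0 = (L.count x : Int) :=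
    fun x => PySem.Dict.getD_counter L x
  have hU2 : ((PySem.Set.ofList L).filter
        (fun x => decide (x ∉ (List.foldl pvBStep1 ([], []) L).2))) =
      L.filter (fun x => decide (L.count x = 1)) := by
    have h1 : ((PySem.Set.ofList L).filter
          (fun x => decide (x ∉ (List.foldl pvBStep1 ([], []) L).2))) =
        (PySem.Set.ofList L).filter (fun x => decide (L.count x = 1)) := by
      apply List.filter_congr
      intro x hx
      have hxL : x ∈ L := (PySem.Set.mem_ofList L x).1 hx
      have h1L : 1 ≤ L.count x := List.count_pos_iff.2 hxL
      have hmem : x ∈ (List.foldl pvBStep1 ([], []) L).2 ↔ 2 ≤ L.count x := by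
        rw [bstep1_snd_mem L ([] : PySem.Set String) [] x]
        simp
      by_cases h2 : 2 ≤ L.count x
      · rw [decide_eq_false (by rw [hmem]; exact fun h => h h2), decide_eq_false (by omega)]
      · rw [decide_eq_true (by rw [hmem]; omega), decide_eq_true (by omega)]
    rw [h1]
    exact dedup_filter_aux L _ (fun x hx => by simpa using Nat.le_of_eq (of_decide_eq_true hx))
  rw [hU2]
  rw [show ((L.length : Int)) = (((List.map pvRc L).length : Int)) by simp]
  rw [PySem.List.foldl_pyRange_zero_pyGetD' (List.map pvRc L) "" pvAStep3]
  have hself : (L.filter (fun x => decide (L.count x = 1))).filter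
        (fun x => !(PySem.Set.contains ([] : PySem.Set String) x)) =
      L.filter (fun x => decide (L.count x = 1)) :=
    List.filter_eq_self.2 (fun _ _ => rfl)
  rw [show (L.filter (fun x => decide (L.count x = 1)),
        (List.foldl pvBStep1 ([], []) L).2) =
      ((L.filter (fun x => decide (L.count x = 1))).filter
          (fun x => !(PySem.Set.contains ([] : PySem.Set String) x)),
        (List.foldl pvBStep1 ([], []) L).2) from by rw [hself]]
  rw [loop3_eq L (PySem.Dict.counter L) hcnt (List.map pvRc L) ([] : PySem.Set String)
    ((List.foldl pvBStep1 ([], []) L).2)]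
  have hfil : List.filter
        (fun x => !(PySem.Set.contains
          (List.foldl (pvBStep2 (PySem.Dict.counter L)) ([], []) (List.map pvRc L)).1 x))
        (L.filter (fun x => decide (L.count x = 1))) =
      L.filter (fun r => (PySem.Dict.counter L).getD r 0 == 1 &&
        !(PySem.Set.contains (PySem.Set.ofList (List.map pvRc L)) r)) := by
    rw [List.filter_filter]
    apply List.filter_congr
    intro x hx
    have hbeq : ((PySem.Dict.counter L).getD x 0 == 1) = decide (L.count x = 1) := by
      rw [hcnt x]
      by_cases hc : L.count x = 1
      · rw [decide_eq_true hc, hc]; rfl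
      · rw [decide_eq_false hc, beq_eq_false_iff_ne]
        exact_mod_cast fun h => hc (by exact_mod_cast h)
    rw [hbeq]
    by_cases hc : L.count x = 1
    · have hmemF : x ∈ (List.foldl (pvBStep2 (PySem.Dict.counter L)) ([], [])
          (List.map pvRc L)).1 ↔ x ∈ List.map pvRc L := by
        rw [bstep2_fst_mem]
        simp [hcnt x, hc]
      have hmemS : x ∈ PySem.Set.ofList (List.map pvRc L) ↔ x ∈ List.map pvRc L :=
        PySem.Set.mem_ofList _ x
      rw [decide_eq_true hc]
      by_cases hr : x ∈ List.map pvRc L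
      · rw [(PySem.Set.contains_iff _ x).2 (hmemF.2 hr), (PySem.Set.contains_iff _ x).2 (hmemS.2 hr)]
        simp
      · rw [show PySem.Set.contains (List.foldl (pvBStep2 (PySem.Dict.counter L)) ([], [])
              (List.map pvRc L)).1 x = false from by
            by_contra h
            exact hr (hmemF.1 ((PySem.Set.contains_iff _ x).1 (by simpa using h))),
          show PySem.Set.contains (PySem.Set.ofList (List.map pvRc L)) x = false from by
            by_contra h
            exact hr (hmemS.1 ((PySem.Set.contains_iff _ x).1 (by simpa using h)))]
        simp
    · rw [decide_eq_false hc]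
      simp
  rw [hfil]
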